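-- pv_equiv track=rewrite | github.com/src-lua/ChronoLattice | prev/automacao_38.py | make_frontier_signature
-- ===== SOURCE A (Python) =====
-- from typing import Any, List, Tuple, Dict, Optional, Set, Callable
--
-- def make_frontier_signature(
--     dependencies: Dict[str, List[str]],
--     finish_times: Dict[str, int],
--     tasks_done_scope: Set[str],
--     tasks_future: List[str]
-- ) -> Tuple[Tuple[str, int, int], ...]:
--     """
--     Assinatura de 'fronteira' para garantir completude ao deduplicar por camada.
--     Para cada tarefa futura (camadas > L), captura:
--       - quantos predecessores dela já estão concluídos dentro do escopo (<= L)
--       - o maior finish_time desses predecessores já concluídos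
--
--     Isso preserva a "visão" que as tarefas futuras têm do estado atual.
--     Retorna tupla ordenada por task_id:
--       ((task_id, n_preds_concluidos_no_escopo, max_ft_preds_no_escopo), ...)
--     """
--     items = []
--     for t in sorted(tasks_future):
--         preds = dependencies.get(t, [])
--         done_preds = [p for p in preds if (p in tasks_done_scope and p in finish_times)]
--         n_done = len(done_preds)
--         max_ft = max((finish_times[p] for p in done_preds), default=0)
--         items.append((t, n_done, max_ft))
--     return tuple(items)
-- ===== SOURCE B (Python) =====
-- def make_frontier_signature(dependencies, finish_times, tasks_done_scope, tasks_future):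
--     # Reverse adjacency: predecessor -> future tasks depending on it (edge multiplicity kept).
--     rev = {}
--     for t in dict.fromkeys(tasks_future):
--         for p in dependencies.get(t, []):
--             rev.setdefault(p, []).append(t)
--     # Scatter each finished in-scope predecessor's finish time to its dependents.
--     acc = {}  # task -> (count, running max or None)
--     for p, v in finish_times.items():
--         if p in tasks_done_scope:
--             for t in rev.get(p, []):
--                 c, m = acc.get(t, (0, None))
--                 acc[t] = (c + 1, v if m is None or v > m else m)
--     items = []
--     for t in sorted(tasks_future):
--         c, m = acc.get(t, (0, None))
--         items.append((t, c, 0 if m is None else m))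
--     return tuple(items)
-- ===== Notes on version B (the rewrite author's own statement) =====
-- stated objective: alternative
-- what changed: Instead of scanning each future task's predecessor list against the done scope and finish-time dict, B builds a reverse adjacency (predecessor -> dependent future tasks) and scatters each finished in-scope predecessor's finish time once to its dependents, accumulating count and running max per task, then emits the sorted tuples.
import Mathlib
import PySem

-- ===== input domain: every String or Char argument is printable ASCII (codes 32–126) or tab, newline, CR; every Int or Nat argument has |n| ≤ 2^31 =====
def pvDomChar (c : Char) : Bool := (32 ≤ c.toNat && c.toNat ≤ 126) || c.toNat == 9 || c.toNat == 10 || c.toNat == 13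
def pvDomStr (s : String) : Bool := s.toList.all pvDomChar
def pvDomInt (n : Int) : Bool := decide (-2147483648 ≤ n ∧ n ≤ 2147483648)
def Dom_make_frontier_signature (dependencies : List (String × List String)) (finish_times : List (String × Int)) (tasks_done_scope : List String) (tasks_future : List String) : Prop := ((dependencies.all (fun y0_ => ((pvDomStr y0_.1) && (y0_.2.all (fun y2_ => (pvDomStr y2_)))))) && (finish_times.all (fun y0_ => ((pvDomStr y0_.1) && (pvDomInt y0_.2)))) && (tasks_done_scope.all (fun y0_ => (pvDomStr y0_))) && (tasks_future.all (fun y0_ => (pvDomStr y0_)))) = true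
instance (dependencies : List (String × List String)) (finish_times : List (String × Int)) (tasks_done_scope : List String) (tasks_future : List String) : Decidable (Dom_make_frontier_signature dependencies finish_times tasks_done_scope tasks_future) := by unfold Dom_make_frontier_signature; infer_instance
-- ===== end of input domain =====

-- B replaces A's per-task scan of predecessor lists (membership test + dict lookup per edge) by a
-- reverse adjacency (predecessor -> dependent future tasks) and one scatter pass over finish_times;
-- objective: alternative algorithm, same exact results.

-- ===== PORT A =====
def make_frontier_signature (dependencies : List (String × List String)) (finish_times : List (String × Int)) (tasks_done_scope : List String) (tasks_future : List String) : List (String × Int × Int) :=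
  let depsD := PySem.Dict.ofList dependencies
  let ftsD := PySem.Dict.ofList finish_times
  (PySem.List.sorted tasks_future (fun x => x) false).foldl (fun items t =>
    let preds := depsD.getD t []
    let done_preds := preds.filter (fun p => tasks_done_scope.contains p && ftsD.contains p)
    let n_done : Int := (done_preds.length : Int)
    let max_ft : Int := PySem.List.maxD (done_preds.map (fun p => ftsD.getD p 0)) (fun x => x) 0
    items ++ [(t, n_done, max_ft)]) []

-- ===== PORT B =====
-- python: v if m is None or v > m else m
def pvMaxUpd (m : Option Int) (v : Int) : Option Int :=
  match m with
  | none => some v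
  | some m0 => if v > m0 then some v else some m0

def make_frontier_signature_alt (dependencies : List (String × List String)) (finish_times : List (String × Int)) (tasks_done_scope : List String) (tasks_future : List String) : List (String × Int × Int) :=
  let depsD := PySem.Dict.ofList dependencies
  -- rev = {}; for t in dict.fromkeys(tasks_future): for p in dependencies.get(t, []): rev.setdefault(p, []).append(t)
  let rev : PySem.Dict String (List String) :=
    (PySem.List.dedup tasks_future).foldl (fun d t =>
      (depsD.getD t []).foldl (fun d p => d.modify p [] (fun l => l ++ [t])) d) PySem.Dict.empty
  -- acc = {}; for p, v in finish_times.items(): if p in tasks_done_scope: for t in rev.get(p, []): ...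
  let acc : PySem.Dict String (Int × Option Int) :=
    (PySem.Dict.ofList finish_times).items.foldl (fun a pv =>
      if tasks_done_scope.contains pv.1 then
        (rev.getD pv.1 []).foldl (fun a t =>
          a.modify t ((0 : Int), (none : Option Int)) (fun cm => (cm.1 + 1, pvMaxUpd cm.2 pv.2))) a
      else a) PySem.Dict.empty
  -- items: for t in sorted(tasks_future): c, m = acc.get(t, (0, None)); items.append((t, c, 0 if m is None else m))
  (PySem.List.sorted tasks_future (fun x => x) false).foldl (fun items t =>
    let cm := acc.getD t ((0 : Int), (none : Option Int))
    items ++ [(t, cm.1, match cm.2 with | none => 0 | some m => m)]) []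

-- ===== PRECONDITION & SPEC =====
def Spec_make_frontier_signature (dependencies : List (String × List String)) (finish_times : List (String × Int)) (tasks_done_scope : List String) (tasks_future : List String) (out : List (String × Int × Int)) : Prop := out = make_frontier_signature_alt dependencies finish_times tasks_done_scope tasks_future
instance (dependencies : List (String × List String)) (finish_times : List (String × Int)) (tasks_done_scope : List String) (tasks_future : List String) (out : List (String × Int × Int)) : Decidable (Spec_make_frontier_signature dependencies finish_times tasks_done_scope tasks_future out) := by unfold Spec_make_frontier_signature; infer_instance

-- ===== CLAIM (what is proved, stated in full; the proofs are below) =====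
def Claim_equal_make_frontier_signature : Prop := ∀ (dependencies : List (String × List String)) (finish_times : List (String × Int)) (tasks_done_scope : List String) (tasks_future : List String), Dom_make_frontier_signature dependencies finish_times tasks_done_scope tasks_future → Spec_make_frontier_signature dependencies finish_times tasks_done_scope tasks_future (make_frontier_signature dependencies finish_times tasks_done_scope tasks_future)

-- ===== LEMMAS AND PROOFS =====

theorem pvMaxUpd_none (v : Int) : pvMaxUpd none v = some v := rfl

theorem pvMaxUpd_some (m0 v : Int) : pvMaxUpd (some m0) v = some (max m0 v) := by
  by_cases h : v ≤ m0
  · simp [pvMaxUpd, not_lt.mpr h, max_eq_left h]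
  · have h' : m0 < v := lt_of_not_ge h
    simp [pvMaxUpd, h', max_eq_right (le_of_lt h')]

-- pvMaxUpd is idempotent in its value argument
theorem pvMaxUpd_idem (m : Option Int) (v : Int) : pvMaxUpd (pvMaxUpd m v) v = pvMaxUpd m v := by
  cases m with
  | none => rw [pvMaxUpd_none, pvMaxUpd_some, max_self]
  | some m0 => rw [pvMaxUpd_some, pvMaxUpd_some, max_assoc, max_self]

-- right-commutativity of pvMaxUpd (max updates commute)
theorem pvMaxUpd_rcomm (m : Option Int) (v w : Int) :
    pvMaxUpd (pvMaxUpd m v) w = pvMaxUpd (pvMaxUpd m w) v := by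
  cases m with
  | none => rw [pvMaxUpd_none, pvMaxUpd_none, pvMaxUpd_some, pvMaxUpd_some, max_comm]
  | some m0 =>
      rw [pvMaxUpd_some, pvMaxUpd_some, pvMaxUpd_some, pvMaxUpd_some, max_right_comm]

-- folding pvMaxUpd over n copies of v is one update (or none)
theorem foldl_pvMaxUpd_replicate (n : Nat) (v : Int) (m : Option Int) :
    (List.replicate n v).foldl pvMaxUpd m = if n = 0 then m else pvMaxUpd m v := by
  induction n generalizing m with
  | zero => simp
  | succ k ih =>
    simp only [List.replicate_succ, List.foldl_cons, ih]
    cases k <;> simp [pvMaxUpd_idem]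

-- the foldl of pvMaxUpd over a list IS PySem's max? with the identity key
theorem foldl_pvMaxUpd_eq_max? (xs : List Int) :
    xs.foldl pvMaxUpd none = PySem.List.max? xs (fun y => y) := by
  unfold PySem.List.max?
  apply PySem.List.foldl_congr_mem
  intro acc x _
  cases acc <;> rfl

-- the inner rev-building loop over one predecessor list, as a fold over key/task pairs
theorem pv_foldl_pair_map (l' : List String) (u : String) (d : PySem.Dict String (List String)) :
    (l'.map (fun q => (q, u))).foldl (fun d pr => d.modify pr.1 [] (fun l => l ++ [pr.2])) d
    = l'.foldl (fun d q => d.modify q [] (fun l => l ++ [u])) d := by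
  rw [List.foldl_map]

-- rev as a filtered edge list (nested build loop = fold over the flattened edge list)
theorem pv_rev_getD_gen (depsD : PySem.Dict String (List String)) (us : List String) (p : String) :
    ∀ d : PySem.Dict String (List String),
    (us.foldl (fun d t => (depsD.getD t []).foldl (fun d q => d.modify q [] (fun l => l ++ [t])) d) d).getD p []
    = d.getD p [] ++ ((us.flatMap (fun t => (depsD.getD t []).map (fun q => (q, t)))).filter
        (fun pr => pr.1 == p)).map (fun pr => pr.2) := by
  induction us with
  | nil => intro d; simp
  | cons u us ih =>
    intro d
    simp only [List.foldl_cons, List.flatMap_cons, List.filter_append, List.map_append]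
    rw [ih, ← pv_foldl_pair_map, PySem.Dict.getD_foldl_modify_append, List.append_assoc]

-- counting a task in the reverse adjacency recovers edge multiplicity
theorem pv_count_edges (g : String → List String) (us : List String) (hnd : us.Nodup) (p t : String) :
    (((us.flatMap (fun u => (g u).map (fun q => (q, u)))).filter (fun pr => pr.1 == p)).map
        (fun pr => pr.2)).count t
    = if t ∈ us then (g t).count p else 0 := by
  induction us with
  | nil => simp
  | cons u us ih =>
    simp only [List.nodup_cons] at hnd
    simp only [List.flatMap_cons, List.filter_append, List.map_append, List.count_append]
    rw [ih hnd.2]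
    have h1 : ((((g u).map (fun q => (q, u))).filter (fun pr => pr.1 == p)).map (fun pr => pr.2))
        = List.replicate ((g u).count p) u := by
      rw [List.filter_map, List.map_map]
      show ((g u).filter (fun q => q == p)).map (fun _ => u) = _
      rw [List.count_eq_countP, List.countP_eq_length_filter]
      exact List.map_const'
    rw [h1, List.count_replicate]
    by_cases he : t = u
    · subst he
      have : t ∉ us := hnd.1
      simp [this]
    · have hbe : (u == t) = false := by simp [Ne.symm he]
      simp [hbe, he]

-- the inner scatter loop, observed at one key
theorem pv_inner_scatter (ts : List String) (v : Int) (t : String) :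
    ∀ a : PySem.Dict String (Int × Option Int),
    ((ts.foldl (fun a u => a.modify u ((0 : Int), (none : Option Int))
        (fun cm => (cm.1 + 1, pvMaxUpd cm.2 v))) a).getD t (0, none))
    = ((a.getD t (0, none)).1 + (ts.count t : Int),
        if ts.count t = 0 then (a.getD t (0, none)).2 else pvMaxUpd (a.getD t (0, none)).2 v) := by
  induction ts with
  | nil => intro a; simp
  | cons u ts ih =>
    intro a
    simp only [List.foldl_cons]
    rw [ih, PySem.Dict.getD_modify]
    by_cases he : t = u
    · subst he
      simp only [if_pos rfl, List.count_cons_self]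
      by_cases hz : ts.count t = 0
      · simp [hz, pvMaxUpd_idem]
      · simp [hz, pvMaxUpd_idem]
        push_cast
        ring
    · have hbe : (u == t) = false := by simp [Ne.symm he]
      simp [he, List.count_cons, hbe]

-- the whole scatter loop, observed at one key, becomes a scalar fold over the entries
theorem pv_acc_getD (scope : List String) (rev : PySem.Dict String (List String))
    (entries : List (String × Int)) (t : String) :
    ∀ a : PySem.Dict String (Int × Option Int),
    ((entries.foldl (fun a pv =>
        if scope.contains pv.1 then
          (rev.getD pv.1 []).foldl (fun a u => a.modify u ((0 : Int), (none : Option Int))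
            (fun cm => (cm.1 + 1, pvMaxUpd cm.2 pv.2))) a
        else a) a).getD t (0, none))
    = entries.foldl (fun cm pv =>
        if scope.contains pv.1 then
          (cm.1 + ((rev.getD pv.1 []).count t : Int),
           if (rev.getD pv.1 []).count t = 0 then cm.2 else pvMaxUpd cm.2 pv.2)
        else cm) (a.getD t (0, none)) := by
  induction entries with
  | nil => intro a; rfl
  | cons pv entries ih =>
    intro a
    simp only [List.foldl_cons]
    rw [ih]
    by_cases hs : scope.contains pv.1
    · rw [if_pos hs, if_pos hs, pv_inner_scatter]
    · rw [if_neg hs, if_neg hs]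

-- the scalar fold computes length and running max of the scattered value multiset
theorem pv_fold_pair (scope : List String) (cnt : String → Nat)
    (entries : List (String × Int)) :
    ∀ init : Int × Option Int,
    entries.foldl (fun cm pv =>
        if scope.contains pv.1 then
          (cm.1 + (cnt pv.1 : Int), if cnt pv.1 = 0 then cm.2 else pvMaxUpd cm.2 pv.2)
        else cm) init
    = (init.1 + ((entries.flatMap (fun pv =>
          if scope.contains pv.1 then List.replicate (cnt pv.1) pv.2 else [])).length : Int),
       (entries.flatMap (fun pv =>
          if scope.contains pv.1 then List.replicate (cnt pv.1) pv.2 else [])).foldl pvMaxUpd init.2) := by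
  induction entries with
  | nil => intro init; simp
  | cons pv entries ih =>
    intro init
    simp only [List.foldl_cons, List.flatMap_cons, List.length_append, List.foldl_append]
    rw [ih]
    by_cases hs : scope.contains pv.1
    · simp only [hs, if_true, foldl_pvMaxUpd_replicate, List.length_replicate]
      by_cases hz : cnt pv.1 = 0
      · simp [hz]
      · simp only [if_neg hz, Prod.mk.injEq]
        refine ⟨by push_cast; ring, trivial⟩
    · have hs' : pv.1 ∉ scope := by simpa using hs
      simp [hs']

-- disjoint filters split up to permutation
theorem pv_filter_or_perm {α : Type} (p q : α → Bool) (hd : ∀ x, ¬(p x = true ∧ q x = true)) :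
    ∀ l : List α, (l.filter (fun x => p x || q x)).Perm (l.filter p ++ l.filter q) := by
  intro l
  induction l with
  | nil => simp
  | cons x l ih =>
    by_cases hp : p x
    · have hq : q x = false := by
        rcases Bool.eq_false_or_eq_true (q x) with h | h
        · exact absurd ⟨hp, h⟩ (hd x)
        · exact h
      simp only [List.filter_cons, hp, hq, Bool.true_or, if_pos rfl]
      simpa using ih.cons x
    · have hp' : p x = false := by simpa using hp
      by_cases hq : q x
      · simp only [List.filter_cons, hp', hq, Bool.false_or]
        refine ((ih.cons x).trans ?_)
        exact List.perm_middle.symm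
      · have hq' : q x = false := by simpa using hq
        simp only [List.filter_cons, hp', hq', Bool.false_or]
        simpa using ih

-- the scattered value multiset is a permutation of A's done-predecessor finish times
theorem pv_vals_perm (scope l : List String) :
    ∀ (entries : List (String × Int)), (entries.map (fun pv => pv.1)).Nodup →
    (entries.flatMap (fun pv =>
        if scope.contains pv.1 then List.replicate (l.count pv.1) pv.2 else [])).Perm
    ((l.filter (fun q => scope.contains q && entries.any (fun pv => pv.1 == q))).map
        (fun q => ((entries.find? (fun pv => pv.1 == q)).map (fun pv => pv.2)).getD 0)) := by
  intro entries
  induction entries with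
  | nil => simp
  | cons e rest ih =>
    intro hnd
    simp only [List.map_cons, List.nodup_cons] at hnd
    have hke : e.1 ∉ rest.map (fun pv => pv.1) := hnd.1
    have hpred : ∀ q : String,
        (scope.contains q && (e :: rest).any (fun pv => pv.1 == q))
        = ((scope.contains q && e.1 == q) || (scope.contains q && rest.any (fun pv => pv.1 == q))) := by
      intro q
      cases h1 : scope.contains q <;> cases h2 : (e.1 == q) <;> simp [List.any_cons, h1, h2]
    have hdisj : ∀ q : String, ¬((scope.contains q && e.1 == q) = true
        ∧ (scope.contains q && rest.any (fun pv => pv.1 == q)) = true) := by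
      rintro q ⟨h1, h2⟩
      obtain ⟨-, he'⟩ : scope.contains q = true ∧ (e.1 == q) = true := by simpa using h1
      have he : e.1 = q := by simpa using he'
      have hr : ∃ pv ∈ rest, (pv.1 == q) = true := by
        obtain ⟨-, h2'⟩ : scope.contains q = true ∧ (rest.any (fun pv => pv.1 == q)) = true := by
          simpa using h2
        simpa [List.any_eq_true] using h2'
      rcases hr with ⟨pv, hmem, hq⟩
      have hpq : pv.1 = q := by simpa using hq
      exact hke (List.mem_map.mpr ⟨pv, hmem, hpq.trans he.symm⟩)
    rw [List.flatMap_cons, List.filter_congr (fun x _ => hpred x)]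
    refine List.Perm.trans ?_ ((pv_filter_or_perm _ _ hdisj l).map _).symm
    rw [List.map_append]
    refine List.Perm.append (List.Perm.of_eq ?_) (List.Perm.trans (ih hnd.2) (List.Perm.of_eq ?_))
    · -- head chunk: all hits are e itself
      have hf : ∀ q ∈ l.filter (fun q => scope.contains q && e.1 == q),
          (((e :: rest).find? (fun pv => pv.1 == q)).map (fun pv => pv.2)).getD 0 = e.2 := by
        intro q hq
        obtain ⟨-, this⟩ : scope.contains q = true ∧ (e.1 == q) = true := by
          simpa using List.of_mem_filter hq
        simp [List.find?, this]
      have hlen : (l.filter (fun q => scope.contains q && e.1 == q)).length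
          = if scope.contains e.1 then l.count e.1 else 0 := by
        rw [← List.countP_eq_length_filter]
        have hc : ∀ x ∈ l, ((scope.contains x && e.1 == x) = true
            ↔ (scope.contains e.1 && e.1 == x) = true) := by
          intro x _
          cases hx : (e.1 == x)
          · simp
          · have hex : e.1 = x := by simpa using hx
            rw [hex]
        rw [List.countP_congr hc]
        cases hs : scope.contains e.1
        · simp
        · simp only [Bool.true_and]
          rw [List.count_eq_countP]
          refine (List.countP_congr ?_).symm
          intro x _
          rw [show (x == e.1) = (e.1 == x) from Bool.beq_comm]
      rw [List.map_congr_left hf, List.map_const', hlen]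
      cases hs : scope.contains e.1 <;> simp
    · -- tail chunk: the lookup never hits e
      refine (List.map_congr_left ?_).symm
      intro q hq
      have hr : ∃ pv ∈ rest, (pv.1 == q) = true := by
        obtain ⟨-, hany⟩ : scope.contains q = true ∧ (rest.any (fun pv => pv.1 == q)) = true := by
          simpa using List.of_mem_filter hq
        simpa [List.any_eq_true] using hany
      rcases hr with ⟨pv, hmem, hpq⟩
      have hpq' : pv.1 = q := by simpa using hpq
      have hne : (e.1 == q) = false := by
        by_contra h
        have h1 : (e.1 == q) = true := by simpa using h
        have h2 : e.1 = q := by simpa using h1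
        exact hke (List.mem_map.mpr ⟨pv, hmem, hpq'.trans h2.symm⟩)
      simp [List.find?, hne]

-- proof-only names for B's intermediate structures (used by the lemmas below)
def pvRevOf (dependencies : List (String × List String)) (tasks_future : List String) :
    PySem.Dict String (List String) :=
  (PySem.List.dedup tasks_future).foldl (fun d u =>
    ((PySem.Dict.ofList dependencies).getD u []).foldl
      (fun d p => d.modify p [] (fun l => l ++ [u])) d) PySem.Dict.empty

def pvAccOf (dependencies : List (String × List String)) (finish_times : List (String × Int))
    (tasks_done_scope : List String) (tasks_future : List String) :
    PySem.Dict String (Int × Option Int) :=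
  (PySem.Dict.ofList finish_times).items.foldl (fun a pv =>
    if tasks_done_scope.contains pv.1 then
      ((pvRevOf dependencies tasks_future).getD pv.1 []).foldl (fun a u =>
        a.modify u ((0 : Int), (none : Option Int))
          (fun cm => (cm.1 + 1, pvMaxUpd cm.2 pv.2))) a
    else a) PySem.Dict.empty

-- A's per-task done-predecessor list
def pvDoneOf (dependencies : List (String × List String)) (finish_times : List (String × Int))
    (tasks_done_scope : List String) (t : String) : List String :=
  ((PySem.Dict.ofList dependencies).getD t []).filter
    (fun p => tasks_done_scope.contains p && (PySem.Dict.ofList finish_times).contains p)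

-- per-task agreement of the two tuple bodies
theorem pv_per_task (dependencies : List (String × List String)) (finish_times : List (String × Int))
    (tasks_done_scope : List String) (tasks_future : List String) (t : String)
    (ht : t ∈ tasks_future) :
    (((pvAccOf dependencies finish_times tasks_done_scope tasks_future).getD t (0, none)).1,
     ((pvAccOf dependencies finish_times tasks_done_scope tasks_future).getD t (0, none)).2.getD 0)
    = (((pvDoneOf dependencies finish_times tasks_done_scope t).length : Int),
       PySem.List.maxD ((pvDoneOf dependencies finish_times tasks_done_scope t).map
         (fun p => (PySem.Dict.ofList finish_times).getD p 0)) (fun x => x) 0) := by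
  have hc : ∀ p : String,
      ((pvRevOf dependencies tasks_future).getD p []).count t
      = (((PySem.Dict.ofList dependencies).getD t []).count p) := by
    intro p
    unfold pvRevOf
    rw [pv_rev_getD_gen, PySem.Dict.getD_empty, List.nil_append,
      pv_count_edges _ _ (PySem.List.nodup_dedup _),
      if_pos ((PySem.List.mem_dedup _ _).mpr ht)]
  unfold pvAccOf
  rw [pv_acc_getD, PySem.Dict.getD_empty]
  simp only [hc]
  rw [pv_fold_pair tasks_done_scope
    (fun p => ((PySem.Dict.ofList dependencies).getD t []).count p)
    (PySem.Dict.ofList finish_times).items (0, none)]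
  have hnd : ((PySem.Dict.ofList finish_times).items.map (fun pv => pv.1)).Nodup :=
    PySem.Dict.nodup_keys_ofList finish_times
  have hperm := pv_vals_perm tasks_done_scope ((PySem.Dict.ofList dependencies).getD t [])
    (PySem.Dict.ofList finish_times).items hnd
  have hdone : (pvDoneOf dependencies finish_times tasks_done_scope t).map
      (fun p => (PySem.Dict.ofList finish_times).getD p 0)
      = ((((PySem.Dict.ofList dependencies).getD t []).filter (fun q => tasks_done_scope.contains q
          && (PySem.Dict.ofList finish_times).items.any (fun pv => pv.1 == q))).map
        (fun q => (((PySem.Dict.ofList finish_times).items.find? (fun pv => pv.1 == q)).map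
          (fun pv => pv.2)).getD 0)) := rfl
  refine Prod.ext ?_ ?_
  · show (0 : Int) + _ = _
    rw [zero_add, hperm.length_eq]
    have : (pvDoneOf dependencies finish_times tasks_done_scope t).length
        = ((pvDoneOf dependencies finish_times tasks_done_scope t).map
            (fun p => (PySem.Dict.ofList finish_times).getD p 0)).length := by
      rw [List.length_map]
    rw [this, hdone]
  · show (_ : Option Int).getD 0 = _
    have hfold := @List.Perm.foldl_eq _ _ pvMaxUpd _ _ ⟨pvMaxUpd_rcomm⟩ hperm (none : Option Int)
    rw [hfold, ← hdone, foldl_pvMaxUpd_eq_max?]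
    rfl

theorem pv_option_match_getD (o : Option Int) :
    (match o with | none => (0 : Int) | some m => m) = o.getD 0 := by
  cases o <;> rfl

-- ===== VERDICT (by name: the statement is the Claim_ definition above) =====
theorem make_frontier_signature_spec : Claim_equal_make_frontier_signature := by
  intro dependencies finish_times tasks_done_scope tasks_future _
  unfold Spec_make_frontier_signature make_frontier_signature make_frontier_signature_alt
  simp only []
  rw [PySem.List.foldl_append_singleton_eq_map, PySem.List.foldl_append_singleton_eq_map,
    List.nil_append, List.nil_append]
  apply List.map_congr_left
  intro t ht
  rw [PySem.List.mem_sorted] at ht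
  have h := pv_per_task dependencies finish_times tasks_done_scope tasks_future t ht
  simp only [pvAccOf, pvRevOf, pvDoneOf] at h
  rw [pv_option_match_getD]
  exact (congrArg (Prod.mk t) h).symm
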